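-- pv_equiv track=rewrite | github.com/tringuyen180303/TIP102-CodePath | unit2/session2/domain_string.py | subdomain
-- ===== SOURCE A (Python) =====
-- def subdomain(domain):
--     string = domain.split(".")
--     array = []
--     answer = ""
--     for i in range(len(string)-1, -1, -1):
--         if i == len(string) -1:
--             answer = string[i]
--             array.append(answer)
--             continue
--         answer = string[i] + "." + answer
--         array.append(answer)
--     return array
-- ===== SOURCE B (Python) =====
-- def subdomain(domain):
--     parts = domain.split(".")
--     return [".".join(parts[i:]) for i in range(len(parts) - 1, -1, -1)]
-- ===== Notes on version B (the rewrite author's own statement) =====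
-- stated objective: simpler
-- what changed: Replaces the stateful loop with a first-iteration special case and a threaded accumulator string by a single comprehension that computes each suffix independently as a join over a slice.
import Mathlib
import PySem

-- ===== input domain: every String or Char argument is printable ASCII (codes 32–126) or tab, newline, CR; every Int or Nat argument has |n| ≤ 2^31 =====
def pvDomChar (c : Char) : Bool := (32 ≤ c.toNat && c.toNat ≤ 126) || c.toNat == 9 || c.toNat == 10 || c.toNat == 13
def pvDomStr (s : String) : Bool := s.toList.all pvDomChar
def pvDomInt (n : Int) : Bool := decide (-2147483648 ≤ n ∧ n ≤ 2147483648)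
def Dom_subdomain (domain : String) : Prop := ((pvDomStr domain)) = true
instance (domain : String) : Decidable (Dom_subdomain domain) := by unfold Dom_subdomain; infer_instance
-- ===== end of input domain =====

-- B replaces A's threaded accumulator string (with its special-cased first iteration) by
-- computing each suffix independently as a join over a slice: a simpler decomposition, same cost.

-- ===== PORT A =====
def subdomain (domain : String) : List String :=
  let string := (PySem.Str.split? domain ".").getD []   -- sep "." ≠ "", so split? is always `some`
  ((PySem.List.pyRange ((string.length : Int) - 1) (-1) (-1)).foldl
    (fun (st : List String × String) i =>
      if i = (string.length : Int) - 1 then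
        let answer := PySem.List.pyGetD string i ""
        (st.1 ++ [answer], answer)
      else
        let answer := PySem.List.pyGetD string i "" ++ "." ++ st.2
        (st.1 ++ [answer], answer))
    ([], "")).1

-- ===== PORT B =====
def subdomain_alt (domain : String) : List String :=
  let parts := (PySem.Str.split? domain ".").getD []
  (PySem.List.pyRange ((parts.length : Int) - 1) (-1) (-1)).map
    (fun i => PySem.Str.join "." (PySem.List.slice parts (some i) none))

-- ===== PRECONDITION & SPEC =====
def Spec_subdomain (domain : String) (out : List String) : Prop := out = subdomain_alt domain
instance (domain : String) (out : List String) : Decidable (Spec_subdomain domain out) := by unfold Spec_subdomain; infer_instance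

-- ===== CLAIM (what is proved, stated in full; the proofs are below) =====
def Claim_equal_subdomain : Prop := ∀ (domain : String), Dom_subdomain domain → Spec_subdomain domain (subdomain domain)

-- ===== LEMMAS AND PROOFS =====

-- descending pyRange peels its first (largest) element
theorem pvPyRange_desc (n : Nat) :
    PySem.List.pyRange (n:Int) (-1) (-1) = (n:Int) :: PySem.List.pyRange ((n:Int)-1) (-1) (-1) := by
  cases n with
  | zero => decide
  | succ m =>
    simp only [PySem.List.pyRange]
    norm_num
    have h1 : ((m:Int)+1+1).toNat = m+2 := by omega
    have h2 : (-1:Int) < (m:Int) := by omega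
    rw [h1, if_pos h2, List.range_succ_eq_map]
    simp only [List.map_cons, List.map_map]
    congr 1
    apply List.map_congr_left
    intro a _; simp [Function.comp]

-- one suffix grows by one part: parts[i] + "." + join(parts[i+1:]) = join(parts[i:])
theorem pvJoin_drop (l : List String) (i : Nat) (h : i + 1 < l.length) :
    PySem.List.pyGetD l (i:Int) "" ++ "." ++ PySem.Str.join "." (l.drop (i+1))
      = PySem.Str.join "." (l.drop i) := by
  have hi : i < l.length := by omega
  rw [PySem.List.pyGetD_natCast, List.getD_eq_getElem l "" hi]
  refine String.toList_inj.mp ?_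
  simp only [PySem.Str.join, String.toList_append, String.toList_ofList]
  rw [List.drop_eq_getElem_cons hi, List.drop_eq_getElem_cons h]
  simp only [List.map_cons]
  rw [PySem.Chars.join_cons_cons]

-- the slice form of a suffix
theorem pvSlice_join (l : List String) (i : Nat) :
    PySem.Str.join "." (PySem.List.slice l (some (i:Int)) none) = PySem.Str.join "." (l.drop i) := by
  rw [PySem.List.slice_from_natCast]

-- join of a one-element drop is that element
theorem pvJoin_last (l : List String) (i : Nat) (h : i + 1 = l.length) :
    PySem.Str.join "." (l.drop i) = PySem.List.pyGetD l (i:Int) "" := by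
  have hi : i < l.length := by omega
  rw [PySem.List.pyGetD_natCast, List.getD_eq_getElem l "" hi]
  rw [List.drop_eq_getElem_cons hi]
  have : l.drop (i+1) = [] := by
    apply List.drop_eq_nil_of_le; omega
  rw [this]
  refine String.toList_inj.mp ?_
  simp only [PySem.Str.join, String.toList_ofList, List.map_cons, List.map_nil,
    PySem.Chars.join_singleton]

-- loop invariant for A's else-phase (all indices strictly below len-1)
theorem pvLoopA (l : List String) (k : Nat) (acc : List String) (h : k + 1 < l.length) :
    (PySem.List.pyRange (k:Int) (-1) (-1)).foldl
      (fun (st : List String × String) i =>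
        if i = (l.length : Int) - 1 then
          (st.1 ++ [PySem.List.pyGetD l i ""], PySem.List.pyGetD l i "")
        else
          (st.1 ++ [PySem.List.pyGetD l i "" ++ "." ++ st.2],
           PySem.List.pyGetD l i "" ++ "." ++ st.2))
      (acc, PySem.Str.join "." (l.drop (k+1)))
    = (acc ++ (PySem.List.pyRange (k:Int) (-1) (-1)).map
        (fun i => PySem.Str.join "." (PySem.List.slice l (some i) none)),
       PySem.Str.join "." (l.drop 0)) := by
  induction k generalizing acc with
  | zero =>
    have h0 : PySem.List.pyRange ((0:Nat):Int) (-1) (-1) = [0] := by decide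
    rw [h0]
    simp only [List.foldl_cons, List.foldl_nil, List.map_cons, List.map_nil]
    have hne : ¬ ((0:Int) = (l.length:Int) - 1) := by omega
    rw [if_neg hne]
    have e1 := pvJoin_drop l 0 (by omega)
    rw [show ((0:Nat):Int) = (0:Int) from rfl] at e1
    rw [show (0+1 : Nat) = 1 from rfl] at e1
    rw [e1]
    have e2 := pvSlice_join l 0
    rw [show ((0:Nat):Int) = (0:Int) from rfl] at e2
    rw [e2]
  | succ k ih =>
    have hcons := pvPyRange_desc (k+1)
    rw [hcons]
    simp only [List.foldl_cons, List.map_cons]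
    have hne : ¬ (((k+1:Nat):Int) = (l.length:Int) - 1) := by
      push_cast; omega
    rw [if_neg hne]
    have hsub : (((k+1:Nat):Int)) - 1 = ((k:Nat):Int) := by push_cast; ring
    rw [hsub]
    rw [pvJoin_drop l (k+1) h]
    rw [ih (acc ++ [PySem.Str.join "." (l.drop (k+1))]) (by omega)]
    rw [pvSlice_join l (k+1)]
    simp

-- A's loop equals B's comprehension, for an arbitrary parts list
theorem pvMain (l : List String) :
    ((PySem.List.pyRange ((l.length : Int) - 1) (-1) (-1)).foldl
      (fun (st : List String × String) i =>
        if i = (l.length : Int) - 1 then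
          let answer := PySem.List.pyGetD l i ""
          (st.1 ++ [answer], answer)
        else
          let answer := PySem.List.pyGetD l i "" ++ "." ++ st.2
          (st.1 ++ [answer], answer))
      ([], "")).1
    = (PySem.List.pyRange ((l.length : Int) - 1) (-1) (-1)).map
        (fun i => PySem.Str.join "." (PySem.List.slice l (some i) none)) := by
  obtain hl | hl | hge : l.length = 0 ∨ l.length = 1 ∨ 2 ≤ l.length := by omega
  · rw [hl]
    have h0 : PySem.List.pyRange (((0:Nat):Int) - 1) (-1) (-1) = [] := by decide
    rw [h0]
    rfl
  · rw [hl]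
    have h1 : PySem.List.pyRange (((1:Nat):Int) - 1) (-1) (-1) = [0] := by decide
    rw [h1]
    simp only [List.foldl_cons, List.foldl_nil, List.map_cons, List.map_nil]
    rw [if_pos (by norm_num)]
    have e2 := pvSlice_join l 0
    have e3 := pvJoin_last l 0 (by omega)
    rw [show ((0:Nat):Int) = (0:Int) from rfl] at e2 e3
    rw [e2, e3]
    simp
  · obtain ⟨n, hl⟩ : ∃ n, l.length = n + 2 := ⟨l.length - 2, by omega⟩
    rw [hl]
    have hs : (((n+2:Nat)):Int) - 1 = ((n+1:Nat):Int) := by push_cast; ring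
    rw [hs, pvPyRange_desc (n+1)]
    simp only [List.foldl_cons, List.map_cons]
    rw [if_pos trivial]
    have hsub : (((n+1:Nat)):Int) - 1 = ((n:Nat):Int) := by push_cast; ring
    rw [hsub]
    simp only [List.nil_append]
    have hlast := pvJoin_last l (n+1) (by omega)
    have hloop := pvLoopA l n [PySem.List.pyGetD l ((n+1:Nat):Int) ""] (by omega)
    rw [hl, hs] at hloop
    rw [hlast] at hloop
    rw [hloop, pvSlice_join l (n+1), hlast]
    simp

-- ===== VERDICT (by name: the statement is the Claim_ definition above) =====
theorem subdomain_spec : Claim_equal_subdomain := by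
  intro domain _
  unfold Spec_subdomain subdomain subdomain_alt
  exact pvMain _
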